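-- pv_equiv track=rewrite | github.com/keyurgolani/OpenForge | backend/openforge/core/content_processors/bookmark_processor.py | _pick_best_content
-- ===== SOURCE A (Python) =====
-- def _pick_best_content(candidates: list[tuple[str, str]]) -> tuple[str, str]:
--     """Pick the best content from candidates."""
--     for strategy, content in candidates:
--         if content and len(content.strip()) > 100:
--             return strategy, content
--
--     # Return first non-empty
--     for strategy, content in candidates:
--         if content and content.strip():
--             return strategy, content
--
--     return "none", ""
-- ===== SOURCE B (Python) =====
-- def _pick_best_content(candidates: list[tuple[str, str]]) -> tuple[str, str]:
--     """Single pass: return a long candidate immediately, remember first non-empty as fallback."""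
--     fallback = None
--     for strategy, content in candidates:
--         if content:
--             stripped = content.strip()
--             if len(stripped) > 100:
--                 return strategy, content
--             if fallback is None and stripped:
--                 fallback = (strategy, content)
--     return fallback if fallback is not None else ("none", "")
-- ===== Notes on version B (the rewrite author's own statement) =====
-- stated objective: alternative
-- what changed: Replaced A's two sequential scans (first for >100-char content, then for any non-empty) by a single pass that returns a long candidate immediately and records the first non-empty candidate as a fallback set only once.
import Mathlib
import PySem

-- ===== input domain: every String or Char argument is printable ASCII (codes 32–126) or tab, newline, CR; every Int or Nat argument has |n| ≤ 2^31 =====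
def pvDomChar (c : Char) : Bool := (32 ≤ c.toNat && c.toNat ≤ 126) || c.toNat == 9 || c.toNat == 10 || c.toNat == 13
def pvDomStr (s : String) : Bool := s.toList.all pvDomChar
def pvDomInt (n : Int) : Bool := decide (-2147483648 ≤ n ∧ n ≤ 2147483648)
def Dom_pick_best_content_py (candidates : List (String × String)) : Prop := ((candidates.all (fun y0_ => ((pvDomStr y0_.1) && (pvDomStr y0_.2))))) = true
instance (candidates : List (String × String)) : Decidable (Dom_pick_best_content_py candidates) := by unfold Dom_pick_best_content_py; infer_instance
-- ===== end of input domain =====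

-- B replaces A's two sequential scans with a single pass that returns a long candidate
-- immediately and records the first non-empty candidate as a once-set fallback (alternative decomposition, same cost).

-- ===== PORT A =====
-- first for-loop: first candidate with truthy content and len(content.strip()) > 100
def pvAfirst (cs : List (String × String)) : Option (String × String) :=
  match cs with
  | [] => none
  | (strategy, content) :: t =>
      if content ≠ "" ∧ (PySem.Str.strip content).length > 100 then some (strategy, content)
      else pvAfirst t

-- second for-loop: first candidate with truthy content and truthy content.strip()
def pvAsecond (cs : List (String × String)) : Option (String × String) :=
  match cs with
  | [] => none
  | (strategy, content) :: t =>
      if content ≠ "" ∧ PySem.Str.strip content ≠ "" then some (strategy, content)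
      else pvAsecond t

def pick_best_content_py (candidates : List (String × String)) : String × String :=
  match pvAfirst candidates with
  | some r => r
  | none =>
    match pvAsecond candidates with
    | some r => r
    | none => ("none", "")

-- ===== PORT B =====
-- single pass with a fallback set at most once; content stripped once per candidate
def pvBloop (cs : List (String × String)) (fallback : Option (String × String)) : String × String :=
  match cs with
  | [] => fallback.getD ("none", "")
  | (strategy, content) :: t =>
      if content ≠ "" then
        let stripped := PySem.Str.strip content
        if stripped.length > 100 then (strategy, content)
        else pvBloop t (if fallback = none ∧ stripped ≠ "" then some (strategy, content) else fallback)
      else pvBloop t fallback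

def pick_best_content_py_alt (candidates : List (String × String)) : String × String :=
  pvBloop candidates none

-- ===== PRECONDITION & SPEC =====
def Spec_pick_best_content_py (candidates : List (String × String)) (out : String × String) : Prop := out = pick_best_content_py_alt candidates
instance (candidates : List (String × String)) (out : String × String) : Decidable (Spec_pick_best_content_py candidates out) := by unfold Spec_pick_best_content_py; infer_instance

-- ===== CLAIM (what is proved, stated in full; the proofs are below) =====
def Claim_equal_pick_best_content_py : Prop := ∀ (candidates : List (String × String)), Dom_pick_best_content_py candidates → Spec_pick_best_content_py candidates (pick_best_content_py candidates)

-- ===== LEMMAS AND PROOFS =====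

-- ===== VERDICT (by name: the statement is the Claim_ definition above) =====
lemma pvBloop_eq (cs : List (String × String)) (fb : Option (String × String)) :
    pvBloop cs fb =
      match pvAfirst cs with
      | some r => r
      | none => ((fb.orElse (fun _ => pvAsecond cs)).getD ("none", "")) := by
  induction cs generalizing fb with
  | nil => cases fb <;> simp [pvBloop, pvAfirst, pvAsecond, Option.orElse]
  | cons hd t ih =>
      obtain ⟨s, c⟩ := hd
      by_cases hc : c = ""
      · simp [pvBloop, pvAfirst, pvAsecond, hc, ih]
      · by_cases hlen : 100 < (PySem.Str.strip c).length
        · simp [pvBloop, pvAfirst, hc, hlen]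
        · by_cases hs : PySem.Str.strip c = ""
          · simp [pvBloop, pvAfirst, pvAsecond, hc, hs, ih]
          · cases fb with
            | none => simp [pvBloop, pvAfirst, pvAsecond, hc, hlen, hs, ih, Option.orElse]
            | some r => simp [pvBloop, pvAfirst, hc, hlen, hs, ih, Option.orElse]

theorem pick_best_content_py_spec : Claim_equal_pick_best_content_py := by
  intro candidates _
  unfold Spec_pick_best_content_py pick_best_content_py pick_best_content_py_alt
  rw [pvBloop_eq]
  cases pvAfirst candidates <;> cases pvAsecond candidates <;> simp [Option.orElse]
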